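-- pv_equiv track=rewrite | github.com/Jisiiss/Poker_Python | fonctions/score.py | count_cards_by_nb
-- ===== SOURCE A (Python) =====
-- def get_card_nb(card: str):
--     return card.split('-')[0]
--
-- def count_cards_by_nb(cards: list):
--     cards_by_nb = {}
--     for card in cards:
--         card_nb = get_card_nb(card)
--         if card_nb not in cards_by_nb:
--             cards_by_nb[card_nb] = 0
--         cards_by_nb[card_nb] += 1
--     return cards_by_nb
-- ===== SOURCE B (Python) =====
-- def count_cards_by_nb(cards: list):
--     ks = [card.split('-')[0] for card in cards]
--     out = {}
--     while ks:
--         k = ks[0]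
--         same = [x for x in ks if x == k]
--         out[k] = len(same)
--         ks = [x for x in ks if x != k]
--     return out
-- ===== Notes on version B (the rewrite author's own statement) =====
-- stated objective: alternative
-- what changed: Replaced the single-pass dict-accumulator (lookup/increment per card) with a partition loop: repeatedly take the first remaining key, split the key list into elements equal and unequal to it, record the key with the size of the equal part, and continue on the unequal remainder (no dictionary lookups or increments).
import Mathlib
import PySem

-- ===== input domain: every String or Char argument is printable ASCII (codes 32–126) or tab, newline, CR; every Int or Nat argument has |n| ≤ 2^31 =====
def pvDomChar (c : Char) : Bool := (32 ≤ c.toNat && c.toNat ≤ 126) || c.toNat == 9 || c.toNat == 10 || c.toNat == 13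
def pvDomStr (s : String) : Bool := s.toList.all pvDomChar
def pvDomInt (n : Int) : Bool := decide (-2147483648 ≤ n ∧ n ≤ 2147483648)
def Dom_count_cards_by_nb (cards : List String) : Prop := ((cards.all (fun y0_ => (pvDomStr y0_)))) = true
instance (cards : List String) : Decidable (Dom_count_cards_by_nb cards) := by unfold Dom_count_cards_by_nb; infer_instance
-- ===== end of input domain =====

-- B replaces A's single-pass dict-accumulator with an iterative partition: take the
-- first key, split off its equals, emit (key, count), continue on the rest; objective: alternative.


-- ===== PORT A =====
-- card.split('-')[0]; split with a nonempty separator always yields a nonempty list, so [0] is its head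
def get_card_nb (card : String) : String := ((PySem.Str.split? card "-").getD []).headD ""

def count_cards_by_nb (cards : List String) : List (String × Int) :=
  (cards.foldl (fun cards_by_nb card =>
      let card_nb := get_card_nb card
      let cards_by_nb :=
        if cards_by_nb.contains card_nb then cards_by_nb else cards_by_nb.insert card_nb 0
      -- cards_by_nb[card_nb] += 1 (the key is present at this point, so getD is exact)
      cards_by_nb.insert card_nb (cards_by_nb.getD card_nb 0 + 1))
    (PySem.Dict.empty : PySem.Dict String Int)).items

-- ===== PORT B =====
-- Source B's while-loop: partition on the first key, continue on the unequal remainder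
def pvGoB : List String → List (String × Int)
  | [] => []
  | k :: tl =>
    let same := (k :: tl).filter (fun x => x == k)
    let rest := (k :: tl).filter (fun x => x != k)
    -- d = {k: len(same)}; d.update(go(rest)) — keys of go(rest) are all ≠ k, so this is a cons
    (k, (same.length : Int)) :: pvGoB rest
  termination_by ks => ks.length
  decreasing_by
    simp only [List.filter_cons]
    simp only [bne_self_eq_false]
    exact Nat.lt_succ_of_le (List.length_filter_le _ _)

def count_cards_by_nb_alt (cards : List String) : List (String × Int) :=
  pvGoB (cards.map (fun card => ((PySem.Str.split? card "-").getD []).headD ""))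

-- ===== PRECONDITION & SPEC =====
def Spec_count_cards_by_nb (cards : List String) (out : List (String × Int)) : Prop := out = count_cards_by_nb_alt cards
instance (cards : List String) (out : List (String × Int)) : Decidable (Spec_count_cards_by_nb cards out) := by unfold Spec_count_cards_by_nb; infer_instance

-- ===== CLAIM (what is proved, stated in full; the proofs are below) =====
def Claim_equal_count_cards_by_nb : Prop := ∀ (cards : List String), Dom_count_cards_by_nb cards → Spec_count_cards_by_nb cards (count_cards_by_nb cards)

-- ===== LEMMAS AND PROOFS =====

-- A's two-step body (setdefault-style insert 0, then insert getD+1) is pointwise the counter step.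
theorem stepA_eq_counter_step (d : PySem.Dict String Int) (k : String) :
    (let d' := if d.contains k then d else d.insert k 0
     d'.insert k (d'.getD k 0 + 1)) = d.insert k (d.getD k 0 + 1) := by
  by_cases h : d.contains k = true
  · simp [h]
  · simp only [Bool.not_eq_true] at h
    rw [PySem.Dict.getD_of_not_contains d 0 h]
    simp [h, PySem.Dict.getD_insert_self, PySem.Dict.insert_insert_self]

theorem count_cards_by_nb_eq_counter (cards : List String) :
    count_cards_by_nb cards =
      (PySem.Dict.counter (cards.map get_card_nb)).items := by
  unfold count_cards_by_nb
  rw [← PySem.Dict.foldl_insert_getD_add_one_eq_counter, List.foldl_map]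
  congr 1
  exact PySem.List.foldl_congr_mem cards _ _ _
    (fun acc x _ => stepA_eq_counter_step acc (get_card_nb x))

-- Set.ofList folding from a set already containing k skips every k in the list.
theorem foldl_add_filter_ne (k : String) :
    ∀ (l : List String) (s : PySem.Set String), k ∈ s →
      l.foldl PySem.Set.add s = (l.filter (fun x => x != k)).foldl PySem.Set.add s := by
  intro l
  induction l with
  | nil => intro s _; rfl
  | cons x tl ih =>
    intro s hk
    by_cases hx : x = k
    · subst hx
      simp only [List.filter_cons, bne_self_eq_false, List.foldl_cons]
      have : PySem.Set.add s x = s := by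
        simp [PySem.Set.add, PySem.Set.contains, hk]
      rw [this]; exact ih s hk
    · have hb : (x != k) = true := by simp [hx]
      simp only [List.filter_cons, hb, if_true, List.foldl_cons]
      exact ih (PySem.Set.add s x) ((PySem.Set.mem_add _ _ _).mpr (Or.inl hk))

-- Folding Set.add from (k :: s) over a list with no k is a cons over folding from s.
theorem foldl_add_cons (k : String) :
    ∀ (l : List String) (s : PySem.Set String), (∀ y ∈ l, y ≠ k) →
      l.foldl PySem.Set.add (k :: s) = k :: l.foldl PySem.Set.add s := by
  intro l
  induction l with
  | nil => intro s _; rfl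
  | cons x tl ih =>
    intro s h
    have hx : x ≠ k := h x (by simp)
    have : PySem.Set.add (k :: s) x = k :: PySem.Set.add s x := by
      simp only [PySem.Set.add, PySem.Set.contains]
      simp [hx]
      split_ifs <;> rfl
    simp only [List.foldl_cons, this]
    exact ih (PySem.Set.add s x) (fun y hy => h y (by simp [hy]))

theorem dedup_cons_filter (k : String) (tl : List String) :
    PySem.List.dedup (k :: tl) = k :: PySem.List.dedup (tl.filter (fun x => x != k)) := by
  simp only [PySem.List.dedup_eq_ofList, PySem.Set.ofList_eq_foldl, List.foldl_cons]
  have h1 : PySem.Set.add ([] : PySem.Set String) k = [k] := by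
    simp [PySem.Set.add, PySem.Set.contains]
  rw [h1, foldl_add_filter_ne k tl [k] (by simp)]
  exact foldl_add_cons k _ [] (fun y hy => by
    have := List.of_mem_filter hy
    simpa using this)

-- pvGoB computes exactly the (first-occurrence key, total count) list.
theorem pvGoB_eq (ks : List String) :
    pvGoB ks = (PySem.List.dedup ks).map (fun j => (j, (ks.count j : Int))) := by
  induction hn : ks.length using Nat.strong_induction_on generalizing ks with
  | _ n ih =>
  match ks with
  | [] => simp [pvGoB, PySem.List.dedup_eq_ofList, PySem.Set.ofList]
  | k :: tl =>
    rw [pvGoB]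
    have hrest : (k :: tl).filter (fun x => x != k) = tl.filter (fun x => x != k) := by
      simp
    have hlen : (tl.filter (fun x => x != k)).length < n := by
      subst hn; exact Nat.lt_succ_of_le (List.length_filter_le _ _)
    rw [hrest, ih _ hlen _ rfl, dedup_cons_filter, List.map_cons]
    refine congrArg₂ List.cons ?_ ?_
    · -- head: same.length = count of k in k :: tl
      refine congrArg (Prod.mk k) ?_
      simp only [List.count_eq_countP, ← List.countP_eq_length_filter]
    · -- tail: counts in the filtered remainder agree with counts in k :: tl
      apply List.map_congr_left
      intro j hj
      have hjmem : j ∈ tl.filter (fun x => x != k) := (PySem.List.mem_dedup _ _).mp hj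
      have hjk : j ≠ k := by
        have := List.of_mem_filter hjmem
        simpa using this
      have h2 : (tl.filter (fun x => x != k)).count j = tl.count j := by
        rw [List.count_filter]
        simp [hjk]
      simp [h2, Ne.symm hjk]

-- ===== VERDICT (by name: the statement is the Claim_ definition above) =====
theorem count_cards_by_nb_spec : Claim_equal_count_cards_by_nb := by
  intro cards _
  show count_cards_by_nb cards = count_cards_by_nb_alt cards
  rw [count_cards_by_nb_eq_counter, PySem.Dict.items_counter]
  unfold count_cards_by_nb_alt get_card_nb
  rw [pvGoB_eq]
  simp [PySem.List.dedup_eq_ofList]
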